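-- pv_equiv track=rewrite | github.com/jail238/judge_template | math/mertens_trick/mertens_trick.py | phi_prefix
-- ===== SOURCE A (Python) =====
-- def phi_prefix(t): # t = ~sqrt(n)+500 precomputation
--     phi = [i for i in range(t+1)]
--     for p in range(2, t+1):
--         if phi[p] == p:
--             for k in range(p, t+1, p): phi[k] -= phi[k]//p
--     prefix = [0 for _ in range(t+1)]
--     s = 0
--     for i in range(1, t+1):
--         s += phi[i]
--         prefix[i] = s
--     return prefix
-- ===== SOURCE B (Python) =====
-- def phi_prefix(t):
--     spf = [0] * (t + 1)
--     for p in range(2, t + 1):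
--         if spf[p] == 0:
--             for k in range(p, t + 1, p):
--                 if spf[k] == 0:
--                     spf[k] = p
--     prefix = [0] * (t + 1)
--     s = 0
--     for k in range(1, t + 1):
--         r = n = k
--         while n > 1:
--             p = spf[n]
--             r -= r // p
--             while n % p == 0:
--                 n //= p
--         s += r
--         prefix[k] = s
--     return prefix
-- ===== Notes on version B (the rewrite author's own statement) =====
-- stated objective: alternative
-- what changed: Replaces A's in-place totient sieve (which repeatedly rescales phi[k] -= phi[k]//p over the multiples of every prime) by a smallest-prime-factor table built first-write-wins, from which each phi(k) is then computed independently by dividing out k's prime factors, fused with the prefix-sum accumulation.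
import Mathlib
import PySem

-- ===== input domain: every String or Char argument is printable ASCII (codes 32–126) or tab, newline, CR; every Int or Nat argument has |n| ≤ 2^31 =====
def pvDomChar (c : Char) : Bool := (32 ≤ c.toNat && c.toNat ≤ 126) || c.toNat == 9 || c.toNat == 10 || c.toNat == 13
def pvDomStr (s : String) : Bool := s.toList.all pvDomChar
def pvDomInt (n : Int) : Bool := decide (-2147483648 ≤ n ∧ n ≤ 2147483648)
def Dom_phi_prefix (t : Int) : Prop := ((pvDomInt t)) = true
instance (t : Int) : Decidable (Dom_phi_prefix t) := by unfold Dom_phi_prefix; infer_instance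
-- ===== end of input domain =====

-- B replaces A's global modified-Eratosthenes totient sieve by an independent per-number
-- trial-division factorization fused with the prefix-sum pass (alternative algorithm, not faster).

-- ===== PORT A =====
-- Literal port of A; all list indices p, k, i are provably in range, so the total
-- pyGetD/pySetD forms are exact here.
def phi_prefix (t : Int) : List Int :=
  let phi0 := PySem.List.pyRange 0 (t+1) 1
  let phi1 := (PySem.List.pyRange 2 (t+1) 1).foldl (fun phi p =>
      if PySem.List.pyGetD phi p 0 == p then
        (PySem.List.pyRange p (t+1) p).foldl (fun ph k =>
            PySem.List.pySetD ph k
              (PySem.List.pyGetD ph k 0 - PySem.Int.floordiv (PySem.List.pyGetD ph k 0) p)) phi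
      else phi) phi0
  let st := (PySem.List.pyRange 1 (t+1) 1).foldl (fun (st : List Int × Int) i =>
      let s := st.2 + PySem.List.pyGetD phi1 i 0
      (PySem.List.pySetD st.1 i s, s)) ((PySem.List.pyRange 0 (t+1) 1).map (fun _ => (0:Int)), 0)
  st.1

-- ===== PORT B =====
-- `while n % p == 0: n //= p`; the fuel argument only bounds the iteration count
-- (n.toNat iterations always suffice on the reachable states p ≥ 2, n ≥ 1).
def pvDivOut : Nat → Int → Int → Int
  | 0, n, _ => n
  | f+1, n, p => if PySem.Int.mod n p == 0 then pvDivOut f (PySem.Int.floordiv n p) p else n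

-- `while n > 1: p = spf[n]; r -= r // p; while n % p == 0: n //= p`
-- (fuel bounds the iteration count; n.toNat iterations suffice since n shrinks each round)
def pvFactorGo : Nat → List Int → Int → Int → Int
  | 0, _, r, _ => r
  | f+1, spf, r, n =>
    if n > 1 then
      let p := PySem.List.pyGetD spf n 0
      pvFactorGo f spf (r - PySem.Int.floordiv r p) (pvDivOut n.toNat n p)
    else r

def phi_prefix_alt (t : Int) : List Int :=
  let spf := (PySem.List.pyRange 2 (t+1) 1).foldl (fun spf p =>
      if PySem.List.pyGetD spf p 0 == 0 then
        (PySem.List.pyRange p (t+1) p).foldl (fun a k =>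
            if PySem.List.pyGetD a k 0 == 0 then PySem.List.pySetD a k p else a) spf
      else spf) (List.replicate (t+1).toNat 0)
  let st := (PySem.List.pyRange 1 (t+1) 1).foldl (fun (st : List Int × Int) k =>
      let r := pvFactorGo k.toNat spf k k
      let s := st.2 + r
      (PySem.List.pySetD st.1 k s, s)) (List.replicate (t+1).toNat 0, 0)
  st.1

-- ===== PRECONDITION & SPEC =====
def Spec_phi_prefix (t : Int) (out : List Int) : Prop := out = phi_prefix_alt t
instance (t : Int) (out : List Int) : Decidable (Spec_phi_prefix t out) := by unfold Spec_phi_prefix; infer_instance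

-- ===== CLAIM (what is proved, stated in full; the proofs are below) =====
def Claim_equal_phi_prefix : Prop := ∀ (t : Int), Dom_phi_prefix t → Spec_phi_prefix t (phi_prefix t)

-- ===== LEMMAS AND PROOFS =====

-- Common functional model: reducing k by a list of primes, `r ↦ r - r/q`.
def pvStep (r q : Nat) : Nat := r - r / q
def pvRed (k : Nat) (l : List Nat) : Nat := l.foldl pvStep k
-- primes < b dividing k, in increasing order
def pvPl (b k : Nat) : List Nat := (List.range b).filter (fun q => decide (Nat.Prime q ∧ q ∣ k))
-- the value phi[k] holds after A's sieve has processed outer values < b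
def pvF (b k : Nat) : Nat := if k = 0 then 0 else pvRed k (pvPl b k)

-- Nat model of B's trial division
def pvDivOutN : Nat → Nat → Nat → Nat
  | 0, n, _ => n
  | f+1, n, p => if n % p = 0 then pvDivOutN f (n / p) p else n

-- Nat model of B's per-number factor extraction loop
def pvFacN : Nat → Nat → Nat → Nat
  | 0, r, _ => r
  | f+1, r, n => if 1 < n then pvFacN f (pvStep r n.minFac) (pvDivOutN n n n.minFac) else r

-- B's model of the spf table: smallest prime factor of k once the sieve has
-- processed outer values < b, else the initial 0
def pvS (b k : Nat) : Int := if 2 ≤ k ∧ k.minFac < b then ((k.minFac : Nat) : Int) else 0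

-- ---- generic list facts ----

lemma pvRed_le (l : List Nat) : ∀ k, pvRed k l ≤ k := by
  induction l with
  | nil => intro k; simp [pvRed]
  | cons q l ih =>
      intro k
      calc pvRed k (q::l) = pvRed (pvStep k q) l := rfl
        _ ≤ pvStep k q := ih _
        _ ≤ k := Nat.sub_le _ _

lemma pvRed_append (k : Nat) (l l' : List Nat) : pvRed k (l ++ l') = pvRed (pvRed k l) l' := by
  simp [pvRed, List.foldl_append]

lemma pvSortedExt (l₁ l₂ : List Nat) (h₁ : l₁.Pairwise (·<·)) (h₂ : l₂.Pairwise (·<·))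
    (hm : ∀ x, x ∈ l₁ ↔ x ∈ l₂) : l₁ = l₂ := by
  have nd₁ : l₁.Nodup := h₁.imp (fun h => Nat.ne_of_lt h)
  have nd₂ : l₂.Nodup := h₂.imp (fun h => Nat.ne_of_lt h)
  exact List.eq_of_perm_of_sorted (fun a b _ _ hab hba => le_antisymm hab hba)
    (h₁.imp le_of_lt) (h₂.imp le_of_lt) ((List.perm_ext_iff_of_nodup nd₁ nd₂).2 hm)

lemma mem_pvPl {b k q : Nat} : q ∈ pvPl b k ↔ q < b ∧ Nat.Prime q ∧ q ∣ k := by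
  simp [pvPl, List.mem_filter, List.mem_range, and_comm]

lemma pairwise_pvPl (b k : Nat) : (pvPl b k).Pairwise (·<·) :=
  List.Pairwise.filter _ List.pairwise_lt_range

lemma pvPl_succ (b k : Nat) :
    pvPl (b+1) k = pvPl b k ++ (if Nat.Prime b ∧ b ∣ k then [b] else []) := by
  simp [pvPl, List.range_succ, List.filter_append]
  split_ifs with h <;> simp [h]

lemma pvPl_stable {k : Nat} (hk : 1 ≤ k) : ∀ {b}, k + 1 ≤ b → pvPl b k = pvPl (k+1) k := by
  intro b
  induction b with
  | zero => omega
  | succ b ih =>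
      intro hb
      rcases Nat.lt_or_ge (k+1) (b+1) with h | h
      · have hb' : k + 1 ≤ b := by omega
        rw [pvPl_succ, ih hb']
        have : ¬ (Nat.Prime b ∧ b ∣ k) := by
          rintro ⟨_, hd⟩
          have := Nat.le_of_dvd hk hd
          omega
        simp [this]
      · have : b + 1 = k + 1 := by omega
        rw [this]

lemma pvMinFac_lt {P : Nat} (hP : 2 ≤ P) (h : ¬ Nat.Prime P) : P.minFac < P := by
  rcases Nat.lt_or_ge P.minFac P with h' | h'
  · exact h'
  · have hle := Nat.minFac_le (by omega : 0 < P)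
    exact absurd (Nat.prime_def_minFac.2 ⟨hP, by omega⟩) h

lemma pvPl_one : pvPl 2 1 = [] := by decide

-- primality characterisation used by A's `phi[p] == p` test
lemma pvRed_self_iff {p : Nat} (hp : 2 ≤ p) : pvRed p (pvPl p p) = p ↔ Nat.Prime p := by
  constructor
  · intro h
    by_contra hnp
    have hne : p ≠ 1 := by omega
    have hq := Nat.minFac_prime hne
    have hqd : p.minFac ∣ p := Nat.minFac_dvd p
    have hqlt : p.minFac < p := by
      rcases Nat.lt_or_ge p.minFac p with h' | h'
      · exact h'
      · have := Nat.minFac_le (by omega : 0 < p)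
        have : p.minFac = p := by omega
        exact absurd (Nat.prime_def_minFac.2 ⟨hp, this⟩) hnp |> False.elim
    have hmem : p.minFac ∈ pvPl p p := mem_pvPl.2 ⟨hqlt, hq, hqd⟩
    rcases hl : pvPl p p with _ | ⟨a, l⟩
    · rw [hl] at hmem; simp at hmem
    · have ha : a ∈ pvPl p p := by rw [hl]; exact List.mem_cons_self
      rcases mem_pvPl.1 ha with ⟨halt, hap, had⟩
      have ha2 : 2 ≤ a := hap.two_le
      have hale : a ≤ p := Nat.le_of_dvd (by omega) had
      have h1 : 1 ≤ p / a := (Nat.one_le_div_iff (by omega)).2 hale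
      have : pvRed p (a :: l) ≤ p - p / a := by
        have := pvRed_le l (pvStep p a)
        simpa [pvRed, pvStep] using this
      rw [hl] at h
      omega
  · intro hp'
    have : pvPl p p = [] := by
      rw [List.eq_nil_iff_forall_not_mem]
      intro q hq
      rcases mem_pvPl.1 hq with ⟨hlt, hqp, hqd⟩
      rcases (Nat.Prime.eq_one_or_self_of_dvd hp' q hqd) with h1 | h1
      · exact hqp.one_lt.ne' h1
      · omega
    simp [this, pvRed]

-- ---- pointwise description of index assignment on a mapped range ----

lemma set_map_range (g : Nat → Int) (N j : Nat) (_hj : j < N) (v : Int) :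
    ((List.range N).map g).set j v
      = (List.range N).map (fun i => if i = j then v else g i) := by
  apply List.ext_getElem
  · simp
  · intro i h1 h2
    simp only [List.getElem_set, List.getElem_map, List.getElem_range] at *
    by_cases h : j = i <;> simp [h, eq_comm]

lemma inner_fold (N : Nat) (u : Int → Int) :
    ∀ (ks : List Int) (g : Nat → Int), ks.Nodup → (∀ k ∈ ks, 0 ≤ k ∧ k.toNat < N) →
    ks.foldl (fun ph k => PySem.List.pySetD ph k (u (PySem.List.pyGetD ph k 0)))
        ((List.range N).map g)
      = (List.range N).map (fun (j : Nat) => if (j:Int) ∈ ks then u (g j) else g j) := by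
  intro ks
  induction ks with
  | nil => intro g _ _; simp
  | cons k ks ih =>
      intro g hnd hin
      rcases hin k List.mem_cons_self with ⟨hk0, hkN⟩
      have hkc : ((k.toNat : Nat) : Int) = k := Int.toNat_of_nonneg hk0
      have hget : PySem.List.pyGetD ((List.range N).map g) k 0 = g k.toNat := by
        conv_lhs => rw [← hkc]
        rw [PySem.List.pyGetD_natCast, PySem.List.getD_map_range _ _ _ _ hkN]
      have hset : PySem.List.pySetD ((List.range N).map g) k (u (g k.toNat))
          = (List.range N).map (fun i => if i = k.toNat then u (g k.toNat) else g i) := by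
        rw [PySem.List.pySetD_of_nonneg _ _ hk0, set_map_range _ _ _ hkN]
      have hknotin : k ∉ ks := (List.nodup_cons.1 hnd).1
      calc (k :: ks).foldl (fun ph k => PySem.List.pySetD ph k (u (PySem.List.pyGetD ph k 0)))
            ((List.range N).map g)
          = ks.foldl (fun ph k => PySem.List.pySetD ph k (u (PySem.List.pyGetD ph k 0)))
            ((List.range N).map (fun i => if i = k.toNat then u (g k.toNat) else g i)) := by
            simp only [List.foldl_cons, hget, hset]
        _ = (List.range N).map (fun (j : Nat) => if (j:Int) ∈ ks then
              u ((fun i => if i = k.toNat then u (g k.toNat) else g i) j)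
              else (fun i => if i = k.toNat then u (g k.toNat) else g i) j) := by
            exact ih _ (List.nodup_cons.1 hnd).2 (fun x hx => hin x (List.mem_cons_of_mem _ hx))
        _ = (List.range N).map (fun (j : Nat) => if (j:Int) ∈ k :: ks then u (g j) else g j) := by
            apply List.map_congr_left
            intro j hj
            by_cases hjk : j = k.toNat
            · subst hjk
              simp [hkc, hknotin, List.mem_cons]
            · have : ((j:Int)) ≠ k := by
                intro h; apply hjk; rw [← hkc] at h; exact_mod_cast h
              simp [hjk, this, List.mem_cons]

lemma inner_fold_spf (N : Nat) (p : Int) :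
    ∀ (ks : List Int) (g : Nat → Int), ks.Nodup → (∀ k ∈ ks, 0 ≤ k ∧ k.toNat < N) →
    ks.foldl (fun a k => if PySem.List.pyGetD a k 0 == 0 then PySem.List.pySetD a k p else a)
        ((List.range N).map g)
      = (List.range N).map (fun (j : Nat) =>
          if (j:Int) ∈ ks then (if g j == 0 then p else g j) else g j) := by
  intro ks
  induction ks with
  | nil => intro g _ _; simp
  | cons k ks ih =>
      intro g hnd hin
      rcases hin k List.mem_cons_self with ⟨hk0, hkN⟩
      have hkc : ((k.toNat : Nat) : Int) = k := Int.toNat_of_nonneg hk0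
      have hget : PySem.List.pyGetD ((List.range N).map g) k 0 = g k.toNat := by
        conv_lhs => rw [← hkc]
        rw [PySem.List.pyGetD_natCast, PySem.List.getD_map_range _ _ _ _ hkN]
      have hhead : (if PySem.List.pyGetD ((List.range N).map g) k 0 == 0 then
            PySem.List.pySetD ((List.range N).map g) k p else (List.range N).map g)
          = (List.range N).map (fun i => if i = k.toNat then
              (if g i == 0 then p else g i) else g i) := by
        rw [hget]
        by_cases h : (g k.toNat == 0) = true
        · rw [if_pos h, PySem.List.pySetD_of_nonneg _ _ hk0, set_map_range _ _ _ hkN]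
          apply List.map_congr_left
          intro j _
          by_cases hj : j = k.toNat
          · subst hj; simp [h]
          · simp [hj]
        · rw [if_neg h]
          apply List.map_congr_left
          intro j _
          by_cases hj : j = k.toNat
          · subst hj; simp [h]
          · simp [hj]
      have hknotin : k ∉ ks := (List.nodup_cons.1 hnd).1
      calc (k :: ks).foldl (fun a k => if PySem.List.pyGetD a k 0 == 0 then
              PySem.List.pySetD a k p else a) ((List.range N).map g)
          = ks.foldl (fun a k => if PySem.List.pyGetD a k 0 == 0 then
              PySem.List.pySetD a k p else a)
            ((List.range N).map (fun i => if i = k.toNat then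
              (if g i == 0 then p else g i) else g i)) := by
            rw [List.foldl_cons, hhead]
        _ = (List.range N).map (fun (j : Nat) => if (j:Int) ∈ ks then
              (if (fun i => if i = k.toNat then (if g i == 0 then p else g i) else g i) j == 0
               then p else (fun i => if i = k.toNat then (if g i == 0 then p else g i) else g i) j)
              else (fun i => if i = k.toNat then (if g i == 0 then p else g i) else g i) j) := by
            exact ih _ (List.nodup_cons.1 hnd).2 (fun x hx => hin x (List.mem_cons_of_mem _ hx))
        _ = (List.range N).map (fun (j : Nat) => if (j:Int) ∈ k :: ks then
              (if g j == 0 then p else g j) else g j) := by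
            apply List.map_congr_left
            intro j hj
            by_cases hjk : j = k.toNat
            · subst hjk
              have hjks : ((k.toNat : Nat) : Int) ∉ ks := by rw [hkc]; exact hknotin
              have hjmem : ((k.toNat : Nat) : Int) ∈ k :: ks := by
                rw [hkc]; exact List.mem_cons_self
              rw [if_neg hjks, if_pos hjmem]
              exact if_pos rfl
            · have hne : ((j:Int)) ≠ k := by
                intro h; apply hjk; rw [← hkc] at h; exact_mod_cast h
              simp only [if_neg hjk]
              by_cases hm : ((j:Int)) ∈ ks
              · have : (j:Int) ∈ k :: ks := List.mem_cons_of_mem _ hm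
                rw [if_pos hm, if_pos this]
              · have : (j:Int) ∉ k :: ks := by
                  rw [List.mem_cons]; rintro (h | h); exact hne h; exact hm h
                rw [if_neg hm, if_neg this]

lemma nodup_pyRange_pos (a b s : Int) (hs : 0 < s) : (PySem.List.pyRange a b s).Nodup := by
  rw [PySem.List.pyRange_of_pos a b hs]
  apply List.Nodup.map _ List.nodup_range
  intro x y h
  have h2 : (s : Int) * x = s * y := by linarith
  have h3 := mul_left_cancel₀ (ne_of_gt hs) h2
  exact_mod_cast h3

lemma pvF_two (k : Nat) : pvF 2 k = k := by
  by_cases h : k = 0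
  · simp [pvF, h]
  · have hnil : pvPl 2 k = [] := by
      rw [List.eq_nil_iff_forall_not_mem]
      intro q hq
      rcases mem_pvPl.1 hq with ⟨hlt, hqp, _⟩
      have := hqp.two_le
      omega
    simp [pvF, h, hnil, pvRed]

-- ---- A's sieve: outer loop invariant ----

-- the outer loop body of A, named for the proofs
def pvBodyA (t : Int) (phi : List Int) (p : Int) : List Int :=
  if PySem.List.pyGetD phi p 0 == p then
    (PySem.List.pyRange p (t+1) p).foldl (fun ph k =>
        PySem.List.pySetD ph k
          (PySem.List.pyGetD ph k 0 - PySem.Int.floordiv (PySem.List.pyGetD ph k 0) p)) phi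
  else phi

lemma stepA (T P : Nat) (hP : 2 ≤ P) (hPT : P < T+1) :
    pvBodyA (T:Int) ((List.range (T+1)).map (fun k => ((pvF P k : Nat) : Int))) (P:Int)
      = (List.range (T+1)).map (fun k => ((pvF (P+1) k : Nat) : Int)) := by
  have hget : PySem.List.pyGetD ((List.range (T+1)).map (fun k => ((pvF P k : Nat) : Int))) (P:Int) 0
      = ((pvF P P : Nat) : Int) := by
    rw [PySem.List.pyGetD_natCast, PySem.List.getD_map_range _ _ _ _ hPT]
  have hFPP : pvF P P = pvRed P (pvPl P P) := by
    unfold pvF; rw [if_neg (by omega : ¬ P = 0)]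
  have hP0 : (0:Int) < (P:Int) := by exact_mod_cast (by omega : 0 < P)
  by_cases hprime : Nat.Prime P
  · have hcond : ((((pvF P P : Nat) : Int)) == (P:Int)) = true := by
      rw [hFPP, (pvRed_self_iff hP).2 hprime]; simp
    unfold pvBodyA
    rw [hget, hcond, if_pos rfl]
    have hbounds : ∀ k ∈ PySem.List.pyRange (P:Int) ((T:Int)+1) (P:Int), 0 ≤ k ∧ k.toNat < T+1 := by
      intro k hk
      rcases (PySem.List.mem_pyRange_iff_of_pos hP0 k).1 hk with ⟨h1, h2, _⟩
      constructor
      · omega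
      · omega
    have hnd := nodup_pyRange_pos (P:Int) ((T:Int)+1) (P:Int) hP0
    refine Eq.trans (inner_fold (T+1) (fun x => x - PySem.Int.floordiv x (P:Int)) _ _ hnd hbounds) ?_
    apply List.map_congr_left
    intro j hj
    have hjT : j < T+1 := List.mem_range.1 hj
    by_cases hjm : ((j:Nat):Int) ∈ PySem.List.pyRange (P:Int) ((T:Int)+1) (P:Int)
    · rcases (PySem.List.mem_pyRange_iff_of_pos hP0 _).1 hjm with ⟨h1, h2, h3⟩
      have hdvdInt : (P:Int) ∣ (j:Int) := by
        have h4 := dvd_add h3 (dvd_refl (P:Int))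
        simpa using h4
      have hdvd : P ∣ j := by exact_mod_cast hdvdInt
      have hPj : P ≤ j := by exact_mod_cast h1
      simp only [if_pos hjm]
      have hfj : pvF (P+1) j = pvF P j - pvF P j / P := by
        unfold pvF
        rw [if_neg (by omega), if_neg (by omega), pvPl_succ, if_pos ⟨hprime, hdvd⟩,
          pvRed_append]
        rfl
      rw [hfj, PySem.Int.floordiv_natCast]
      have hle := Nat.div_le_self (pvF P j) P
      generalize pvF P j = a at hle ⊢
      generalize a / P = b at hle ⊢
      omega
    · simp only [if_neg hjm]
      congr 1
      by_cases hj0 : j = 0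
      · subst hj0; simp [pvF]
      · have hnd2 : ¬ P ∣ j := by
          intro hdvd
          apply hjm
          have hPj : P ≤ j := Nat.le_of_dvd (by omega) hdvd
          apply (PySem.List.mem_pyRange_iff_of_pos hP0 _).2
          refine ⟨by exact_mod_cast hPj, by omega, ?_⟩
          have h5 : (P:Int) ∣ (j:Int) := by exact_mod_cast hdvd
          exact dvd_sub h5 (dvd_refl _)
        unfold pvF
        rw [if_neg hj0, if_neg hj0, pvPl_succ, if_neg (by tauto), List.append_nil]
  · have hcond : ((((pvF P P : Nat) : Int)) == (P:Int)) = false := by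
      have hne : pvF P P ≠ P := by
        rw [hFPP]; intro h; exact hprime ((pvRed_self_iff hP).1 h)
      simp [hne]
    unfold pvBodyA
    rw [hget, hcond]
    simp only [Bool.false_eq_true, if_false]
    apply List.map_congr_left
    intro j hj
    congr 1
    by_cases hj0 : j = 0
    · simp [hj0, pvF]
    · unfold pvF
      rw [if_neg hj0, if_neg hj0, pvPl_succ, if_neg (by tauto), List.append_nil]

lemma outer_fold (T : Nat) : ∀ (m P : Nat), 2 ≤ P → P + m = T + 1 →
    (PySem.List.pyRange (P:Int) ((T:Int)+1) 1).foldl (pvBodyA (T:Int))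
        ((List.range (T+1)).map (fun k => ((pvF P k : Nat) : Int)))
      = (List.range (T+1)).map (fun k => ((pvF (T+1) k : Nat) : Int)) := by
  intro m
  induction m with
  | zero =>
      intro P hP2 hPm
      have : ((T:Int)+1) ≤ (P:Int) := by omega
      rw [PySem.List.pyRange_one_eq_nil this]
      simp only [List.foldl_nil]
      have : P = T + 1 := by omega
      rw [this]
  | succ m ih =>
      intro P hP2 hPm
      have hlt : (P:Int) < (T:Int)+1 := by omega
      rw [PySem.List.pyRange_one_cons hlt, List.foldl_cons, stepA T P hP2 (by omega)]
      have : (P:Int) + 1 = ((P+1 : Nat) : Int) := by push_cast; ring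
      rw [this]
      exact ih (P+1) (by omega) (by omega)

-- ---- B's spf sieve: outer loop invariant ----

-- the spf-sieve loop body of B, named for the proofs
def pvBodyB (t : Int) (spf : List Int) (p : Int) : List Int :=
  if PySem.List.pyGetD spf p 0 == 0 then
    (PySem.List.pyRange p (t+1) p).foldl (fun a k =>
        if PySem.List.pyGetD a k 0 == 0 then PySem.List.pySetD a k p else a) spf
  else spf

lemma stepB (T P : Nat) (hP : 2 ≤ P) (hPT : P < T+1) :
    pvBodyB (T:Int) ((List.range (T+1)).map (fun k => pvS P k)) (P:Int)
      = (List.range (T+1)).map (fun k => pvS (P+1) k) := by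
  have hget : PySem.List.pyGetD ((List.range (T+1)).map (fun k => pvS P k)) (P:Int) 0
      = pvS P P := by
    rw [PySem.List.pyGetD_natCast, PySem.List.getD_map_range _ _ _ _ hPT]
  have hP0 : (0:Int) < (P:Int) := by exact_mod_cast (by omega : 0 < P)
  by_cases hprime : Nat.Prime P
  · have h0 : pvS P P = 0 := by
      unfold pvS
      rw [if_neg]
      rintro ⟨_, hlt⟩
      rw [(Nat.prime_def_minFac.1 hprime).2] at hlt
      omega
    have hcond : (pvS P P == 0) = true := by rw [h0]; rfl
    unfold pvBodyB
    rw [hget, hcond, if_pos rfl]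
    have hbounds : ∀ k ∈ PySem.List.pyRange (P:Int) ((T:Int)+1) (P:Int), 0 ≤ k ∧ k.toNat < T+1 := by
      intro k hk
      rcases (PySem.List.mem_pyRange_iff_of_pos hP0 k).1 hk with ⟨h1, h2, _⟩
      constructor
      · omega
      · omega
    have hnd := nodup_pyRange_pos (P:Int) ((T:Int)+1) (P:Int) hP0
    refine Eq.trans (inner_fold_spf (T+1) (P:Int) _ _ hnd hbounds) ?_
    apply List.map_congr_left
    intro j hj
    have hjT : j < T+1 := List.mem_range.1 hj
    by_cases hjm : ((j:Nat):Int) ∈ PySem.List.pyRange (P:Int) ((T:Int)+1) (P:Int)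
    · rcases (PySem.List.mem_pyRange_iff_of_pos hP0 _).1 hjm with ⟨h1, h2, h3⟩
      have hdvdInt : (P:Int) ∣ (j:Int) := by
        have h4 := dvd_add h3 (dvd_refl (P:Int))
        simpa using h4
      have hdvd : P ∣ j := by exact_mod_cast hdvdInt
      have hPj : P ≤ j := by exact_mod_cast h1
      have hj2 : 2 ≤ j := by omega
      have hmle : j.minFac ≤ P := Nat.minFac_le_of_dvd hP hdvd
      have hm2 : 2 ≤ j.minFac := (Nat.minFac_prime (by omega : j ≠ 1)).two_le
      rw [if_pos hjm]
      by_cases hlt : j.minFac < P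
      · have hv : pvS P j = ((j.minFac : Nat) : Int) := by unfold pvS; rw [if_pos ⟨hj2, hlt⟩]
        have hne : (pvS P j == 0) = false := by
          rw [hv]; simp; omega
        rw [hne]
        simp only [Bool.false_eq_true, if_false]
        rw [hv]
        unfold pvS
        rw [if_pos ⟨hj2, by omega⟩]
      · have heq : j.minFac = P := by omega
        have hv : pvS P j = 0 := by unfold pvS; rw [if_neg]; rintro ⟨_, h⟩; omega
        have hc : (pvS P j == 0) = true := by rw [hv]; rfl
        rw [hc, if_pos rfl]
        unfold pvS
        rw [if_pos ⟨hj2, by omega⟩, heq]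
    · rw [if_neg hjm]
      by_cases hj2 : 2 ≤ j
      · have hnd2 : ¬ P ∣ j := by
          intro hdvd
          apply hjm
          have hPj : P ≤ j := Nat.le_of_dvd (by omega) hdvd
          apply (PySem.List.mem_pyRange_iff_of_pos hP0 _).2
          refine ⟨by exact_mod_cast hPj, by omega, ?_⟩
          have h5 : (P:Int) ∣ (j:Int) := by exact_mod_cast hdvd
          exact dvd_sub h5 (dvd_refl _)
        have hne : j.minFac ≠ P := by
          intro h
          exact hnd2 (h ▸ Nat.minFac_dvd j)
        unfold pvS
        by_cases hlt : j.minFac < P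
        · rw [if_pos ⟨hj2, hlt⟩, if_pos ⟨hj2, by omega⟩]
        · rw [if_neg (by rintro ⟨_, h⟩; omega), if_neg (by rintro ⟨_, h⟩; omega)]
      · unfold pvS
        rw [if_neg (by rintro ⟨h, _⟩; omega), if_neg (by rintro ⟨h, _⟩; omega)]
  · have hm2 : 2 ≤ P.minFac := (Nat.minFac_prime (by omega : P ≠ 1)).two_le
    have hlt := pvMinFac_lt hP hprime
    have hv : pvS P P = ((P.minFac : Nat) : Int) := by unfold pvS; rw [if_pos ⟨hP, hlt⟩]
    have hcond : (pvS P P == 0) = false := by rw [hv]; simp; omega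
    unfold pvBodyB
    rw [hget, hcond]
    simp only [Bool.false_eq_true, if_false]
    apply List.map_congr_left
    intro j _
    by_cases hj2 : 2 ≤ j
    · have hne : j.minFac ≠ P := by
        intro h
        exact hprime (h ▸ Nat.minFac_prime (by omega : j ≠ 1))
      unfold pvS
      by_cases hlt2 : j.minFac < P
      · rw [if_pos ⟨hj2, hlt2⟩, if_pos ⟨hj2, by omega⟩]
      · rw [if_neg (by rintro ⟨_, h⟩; omega), if_neg (by rintro ⟨_, h⟩; omega)]
    · unfold pvS
      rw [if_neg (by rintro ⟨h, _⟩; omega), if_neg (by rintro ⟨h, _⟩; omega)]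

lemma outer_foldB (T : Nat) : ∀ (m P : Nat), 2 ≤ P → P + m = T + 1 →
    (PySem.List.pyRange (P:Int) ((T:Int)+1) 1).foldl (pvBodyB (T:Int))
        ((List.range (T+1)).map (fun k => pvS P k))
      = (List.range (T+1)).map (fun k => pvS (T+1) k) := by
  intro m
  induction m with
  | zero =>
      intro P hP2 hPm
      have h1 : ((T:Int)+1) ≤ (P:Int) := by omega
      rw [PySem.List.pyRange_one_eq_nil h1]
      simp only [List.foldl_nil]
      have : P = T + 1 := by omega
      rw [this]
  | succ m ih =>
      intro P hP2 hPm
      have hlt : (P:Int) < (T:Int)+1 := by omega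
      rw [PySem.List.pyRange_one_cons hlt, List.foldl_cons, stepB T P hP2 (by omega)]
      have h2 : (P:Int) + 1 = ((P+1 : Nat) : Int) := by push_cast; ring
      rw [h2]
      exact ih (P+1) (by omega) (by omega)

lemma spfB (T : Nat) :
    (PySem.List.pyRange 2 ((T:Int)+1) 1).foldl (pvBodyB (T:Int))
        (List.replicate ((T:Int)+1).toNat 0)
      = (List.range (T+1)).map (fun k => pvS (T+1) k) := by
  have hS2 : ∀ k, pvS 2 k = 0 := by
    intro k
    unfold pvS
    rw [if_neg]
    rintro ⟨hk, hlt⟩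
    have := (Nat.minFac_prime (by omega : k ≠ 1)).two_le
    omega
  have hinit : List.replicate ((T:Int)+1).toNat (0:Int)
      = (List.range (T+1)).map (fun k => pvS 2 k) := by
    have h1 : (List.range (T+1)).map (fun k => pvS 2 k)
        = (List.range (T+1)).map (fun _ => (0:Int)) :=
      List.map_congr_left (fun j _ => hS2 j)
    rw [h1, List.map_const', List.length_range,
      show ((T:Int)+1).toNat = T+1 by omega]
  rcases Nat.eq_zero_or_pos T with hT | hT
  · subst hT
    have h2 : PySem.List.pyRange 2 (((0:Nat):Int)+1) 1 = [] :=
      PySem.List.pyRange_one_eq_nil (by norm_num)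
    rw [h2, List.foldl_nil, hinit]
    apply List.map_congr_left
    intro j hj
    have : j = 0 := by have := List.mem_range.1 hj; omega
    subst this
    rfl
  · rw [hinit]
    have h := outer_foldB T (T-1) 2 (by omega) (by omega)
    rw [show (((2:Nat)):Int) = (2:Int) by norm_num] at h
    exact h

-- ---- B's factor extraction: correctness on the Nat model ----

lemma pvDivOutN_spec : ∀ (f n p : Nat), 1 ≤ n → 2 ≤ p → n ≤ f →
    ∃ e, n = p ^ e * pvDivOutN f n p ∧ ¬ p ∣ pvDivOutN f n p := by
  intro f
  induction f with
  | zero => intro n p h1 _ hf; omega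
  | succ f ih =>
      intro n p h1 hp hf
      by_cases h : n % p = 0
      · have hd : p ∣ n := Nat.dvd_of_mod_eq_zero h
        have hple : p ≤ n := Nat.le_of_dvd (by omega) hd
        have h1' : 1 ≤ n / p := (Nat.one_le_div_iff (by omega)).2 hple
        have hlt : n / p < n := Nat.div_lt_self (by omega) (by omega)
        obtain ⟨e, he, hnd⟩ := ih (n / p) p h1' hp (by omega)
        refine ⟨e + 1, ?_, ?_⟩
        · have : pvDivOutN (f+1) n p = pvDivOutN f (n / p) p := by simp [pvDivOutN, h]
          rw [this, pow_succ]
          calc n = p * (n / p) := (Nat.mul_div_cancel' hd).symm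
            _ = p * (p ^ e * pvDivOutN f (n / p) p) := by rw [← he]
            _ = p ^ e * p * pvDivOutN f (n / p) p := by ring
        · have : pvDivOutN (f+1) n p = pvDivOutN f (n / p) p := by simp [pvDivOutN, h]
          rw [this]; exact hnd
      · have hnd : ¬ p ∣ n := fun hd => h (Nat.eq_zero_of_dvd_of_lt hd |> fun _ => by
          obtain ⟨c, rfl⟩ := hd; simp [Nat.mul_mod_right])
        refine ⟨0, ?_, ?_⟩ <;> simp [pvDivOutN, h, hnd]

-- ---- Int-Nat bridges for the B port ----

-- splitting off the smallest prime factor of n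
lemma pvPl_cons {n n' p e : Nat} (hp : Nat.Prime p) (h1 : 1 ≤ n)
    (hfac : ∀ q, Nat.Prime q → q ∣ n → p ≤ q)
    (he : n = p ^ e * n') (he1 : 1 ≤ e) (hnd : ¬ p ∣ n') :
    pvPl (n+1) n = p :: pvPl (n'+1) n' := by
  have hn' : 1 ≤ n' := by
    rcases Nat.eq_zero_or_pos n' with h | h
    · subst h; simp at he; omega
    · exact h
  have hdvdn : n' ∣ n := ⟨p ^ e, by rw [he]; ring⟩
  have hpd : p ∣ n := by
    rw [he]
    exact Dvd.dvd.mul_right (dvd_pow_self p (by omega)) n'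
  apply pvSortedExt _ _ (pairwise_pvPl _ _)
  · rw [List.pairwise_cons]
    refine ⟨?_, pairwise_pvPl _ _⟩
    intro q hq
    rcases mem_pvPl.1 hq with ⟨_, hqp, hqd⟩
    have hq1 : p ≤ q := hfac q hqp (hqd.trans hdvdn)
    have : q ≠ p := fun hqe => hnd (hqe ▸ hqd)
    omega
  · intro q
    simp only [mem_pvPl, List.mem_cons]
    constructor
    · rintro ⟨_, hqp, hqd⟩
      by_cases hqe : q = p
      · exact Or.inl hqe
      · right
        have hcop : q.Coprime (p ^ e) := by
          apply Nat.Coprime.pow_right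
          rw [Nat.coprime_primes hqp hp]
          exact hqe
        have hqn' : q ∣ n' := hcop.dvd_of_dvd_mul_left (he ▸ hqd)
        exact ⟨by have := Nat.le_of_dvd hn' hqn'; omega, hqp, hqn'⟩
    · rintro (rfl | hq)
      · exact ⟨by have := Nat.le_of_dvd h1 hpd; omega, hp, hpd⟩
      · rcases hq with ⟨_, hqp, hqd⟩
        have := Nat.le_of_dvd h1 (hqd.trans hdvdn)
        exact ⟨by omega, hqp, hqd.trans hdvdn⟩

lemma pvFacN_spec : ∀ (f r n : Nat), 1 ≤ n → n ≤ f + 1 →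
    pvFacN f r n = pvRed r (pvPl (n+1) n) := by
  intro f
  induction f with
  | zero =>
      intro r n h1 hf
      have : n = 1 := by omega
      subst this
      simp [pvFacN, pvPl_one, pvRed]
  | succ f ih =>
      intro r n h1 hf
      by_cases hn1 : 1 < n
      · have hp := Nat.minFac_prime (by omega : n ≠ 1)
        have hp2 := hp.two_le
        have hd := Nat.minFac_dvd n
        obtain ⟨e, he, hnd⟩ := pvDivOutN_spec n n n.minFac h1 hp2 le_rfl
        set n' := pvDivOutN n n n.minFac with hn'def
        have he1 : 1 ≤ e := by
          by_contra hc
          have : e = 0 := by omega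
          subst this
          simp at he
          exact hnd (he ▸ hd)
        have hn'1 : 1 ≤ n' := by
          rcases Nat.eq_zero_or_pos n' with h0 | h0
          · rw [h0, Nat.mul_zero] at he; omega
          · exact h0
        have hn'small : 2 * n' ≤ n := by
          have hpe : n.minFac ≤ n.minFac ^ e := Nat.le_self_pow (by omega) _
          calc 2 * n' ≤ n.minFac * n' := Nat.mul_le_mul_right _ (by omega)
            _ ≤ n.minFac ^ e * n' := Nat.mul_le_mul_right _ hpe
            _ = n := he.symm
        have hfac : ∀ q, Nat.Prime q → q ∣ n → n.minFac ≤ q :=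
          fun q hqp hqd => Nat.minFac_le_of_dvd hqp.two_le hqd
        have hstep : pvFacN (f+1) r n = pvFacN f (pvStep r n.minFac) n' := by
          simp [pvFacN, hn1, ← hn'def]
        rw [hstep, pvPl_cons hp h1 hfac he he1 hnd]
        have hr : pvRed r (n.minFac :: pvPl (n'+1) n') = pvRed (pvStep r n.minFac) (pvPl (n'+1) n') := rfl
        rw [hr]
        exact ih (pvStep r n.minFac) n' hn'1 (by omega)
      · have : n = 1 := by omega
        subst this
        simp [pvFacN, pvPl_one, pvRed]

lemma pvDivOut_cast : ∀ (f : Nat) (n p : Nat),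
    pvDivOut f (n:Int) (p:Int) = ((pvDivOutN f n p : Nat) : Int) := by
  intro f
  induction f with
  | zero => intro n p; simp [pvDivOut, pvDivOutN]
  | succ f ih =>
      intro n p
      simp only [pvDivOut, pvDivOutN, PySem.Int.mod_natCast, PySem.Int.floordiv_natCast]
      by_cases h : n % p = 0
      · simpa [h] using ih (n / p) p
      · have hnd : ¬ ((p:Int) ∣ (n:Int)) := by
          intro hd
          have hd' : (p:Nat) ∣ n := by exact_mod_cast hd
          obtain ⟨c, rfl⟩ := hd'; simp [Nat.mul_mod_right] at h
        simp [h, hnd]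

lemma pvFactorGo_cast (T : Nat) : ∀ (f r n : Nat), n ≤ T →
    pvFactorGo f ((List.range (T+1)).map (fun k => pvS (T+1) k)) (r:Int) (n:Int)
      = ((pvFacN f r n : Nat) : Int) := by
  intro f
  induction f with
  | zero => intro r n _; simp [pvFactorGo, pvFacN]
  | succ f ih =>
      intro r n hn
      by_cases h1 : 1 < n
      · have h1' : ((n:Int) > 1) := by exact_mod_cast h1
        have hp2 := (Nat.minFac_prime (by omega : n ≠ 1)).two_le
        have hmle : n.minFac ≤ n := Nat.minFac_le (by omega)
        have hget : PySem.List.pyGetD ((List.range (T+1)).map (fun k => pvS (T+1) k)) (n:Int) 0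
            = ((n.minFac : Nat) : Int) := by
          rw [PySem.List.pyGetD_natCast, PySem.List.getD_map_range _ _ _ _ (by omega : n < T+1)]
          unfold pvS
          rw [if_pos ⟨by omega, by omega⟩]
        have hm : pvFacN (f+1) r n = pvFacN f (pvStep r n.minFac) (pvDivOutN n n n.minFac) := by
          simp [pvFacN, h1]
        rw [hm]
        have hgo : pvFactorGo (f+1) ((List.range (T+1)).map (fun k => pvS (T+1) k)) (r:Int) (n:Int)
            = pvFactorGo f ((List.range (T+1)).map (fun k => pvS (T+1) k))
                ((r:Int) - PySem.Int.floordiv (r:Int) ((n.minFac : Nat) : Int))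
                (pvDivOut ((n:Int)).toNat (n:Int) ((n.minFac : Nat) : Int)) := by
          rw [pvFactorGo]
          rw [if_pos h1', hget]
        rw [hgo, Int.toNat_natCast, pvDivOut_cast]
        have hsub : (r:Int) - PySem.Int.floordiv (r:Int) ((n.minFac : Nat) : Int)
            = ((r - r / n.minFac : Nat) : Int) := by
          rw [PySem.Int.floordiv_natCast]
          have hle := Nat.div_le_self r n.minFac
          generalize r / n.minFac = b at hle ⊢
          omega
        rw [hsub]
        -- the remaining cofactor stays ≤ T
        obtain ⟨e, he, hnd⟩ := pvDivOutN_spec n n n.minFac (by omega) hp2 le_rfl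
        have hdvd : pvDivOutN n n n.minFac ∣ n := by
          conv_rhs => rw [he]
          exact dvd_mul_left _ _
        have hle' : pvDivOutN n n n.minFac ≤ T :=
          le_trans (Nat.le_of_dvd (by omega) hdvd) hn
        rw [ih (r - r / n.minFac) (pvDivOutN n n n.minFac) hle']
        rfl
      · have h1' : ¬ ((n:Int) > 1) := by exact_mod_cast h1
        rw [pvFactorGo, if_neg h1']
        have : pvFacN (f+1) r n = r := by simp [pvFacN, h1]
        rw [this]

-- ---- assembling both sides ----

lemma phiA (T : Nat) :
    (PySem.List.pyRange 2 ((T:Int)+1) 1).foldl (pvBodyA (T:Int))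
        (PySem.List.pyRange 0 ((T:Int)+1) 1)
      = (List.range (T+1)).map (fun k => ((pvF (T+1) k : Nat) : Int)) := by
  have hinit : PySem.List.pyRange 0 ((T:Int)+1) 1
      = (List.range (T+1)).map (fun k => ((pvF 2 k : Nat) : Int)) := by
    rw [show ((T:Int)+1) = (((T+1:Nat)):Int) by push_cast; ring, PySem.List.pyRange_zero_nat]
    apply List.map_congr_left
    intro j _
    rw [pvF_two]
  rcases Nat.eq_zero_or_pos T with hT | hT
  · subst hT
    have h2 : PySem.List.pyRange 2 (((0:Nat):Int)+1) 1 = [] := by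
      exact PySem.List.pyRange_one_eq_nil (by norm_num)
    rw [h2, List.foldl_nil, hinit]
    apply List.map_congr_left
    intro j hj
    have : j = 0 := by have := List.mem_range.1 hj; omega
    subst this
    simp [pvF]
  · rw [hinit]
    have h := outer_fold T (T-1) 2 (by omega) (by omega)
    rw [show (((2:Nat)):Int) = (2:Int) by norm_num] at h
    exact h

lemma main_nonneg (T : Nat) : phi_prefix (T:Int) = phi_prefix_alt (T:Int) := by
  simp only [phi_prefix, phi_prefix_alt]
  rw [show (fun (phi : List Int) (p : Int) =>
      if PySem.List.pyGetD phi p 0 == p then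
        (PySem.List.pyRange p ((T:Int)+1) p).foldl (fun ph k =>
            PySem.List.pySetD ph k
              (PySem.List.pyGetD ph k 0 - PySem.Int.floordiv (PySem.List.pyGetD ph k 0) p)) phi
      else phi) = pvBodyA (T:Int) from rfl, phiA T]
  rw [show (fun (spf : List Int) (p : Int) =>
      if PySem.List.pyGetD spf p 0 == 0 then
        (PySem.List.pyRange p ((T:Int)+1) p).foldl (fun a k =>
            if PySem.List.pyGetD a k 0 == 0 then PySem.List.pySetD a k p else a) spf
      else spf) = pvBodyB (T:Int) from rfl, spfB T]
  have hinit : ((PySem.List.pyRange 0 ((T:Int)+1) 1).map (fun _ => (0:Int)))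
      = List.replicate ((T:Int)+1).toNat 0 := by
    rw [List.map_const']
    congr 1
    rw [PySem.List.length_pyRange_one]
    omega
  rw [hinit]
  congr 1
  apply PySem.List.foldl_congr_mem
  intro acc i hi
  rcases PySem.List.mem_pyRange_one.1 hi with ⟨h1, h2⟩
  set I := i.toNat with hIdef
  have hiI : ((I:Nat):Int) = i := Int.toNat_of_nonneg (by omega)
  have hI1 : 1 ≤ I := by omega
  have hIT : I < T+1 := by omega
  have hA : PySem.List.pyGetD ((List.range (T+1)).map (fun k => ((pvF (T+1) k : Nat) : Int))) i 0
      = ((pvF (T+1) I : Nat) : Int) := by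
    conv_lhs => rw [← hiI]
    rw [PySem.List.pyGetD_natCast, PySem.List.getD_map_range _ _ _ _ hIT]
  have hB : pvFactorGo I ((List.range (T+1)).map (fun k => pvS (T+1) k)) i i
      = ((pvF (T+1) I : Nat) : Int) := by
    conv_lhs => rw [← hiI]
    rw [pvFactorGo_cast T I I I (by omega : I ≤ T),
      pvFacN_spec I I I hI1 (by omega : I ≤ I + 1)]
    congr 1
    unfold pvF
    rw [if_neg (by omega), pvPl_stable hI1 (by omega : I + 1 ≤ T + 1)]
  simp only [hA, hB]

theorem phi_prefix_spec_aux : ∀ (t : Int), phi_prefix t = phi_prefix_alt t := by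
  intro t
  rcases (by omega : 0 ≤ t ∨ t < 0) with h | h
  · have : t = ((t.toNat : Nat) : Int) := (Int.toNat_of_nonneg h).symm
    rw [this, main_nonneg]
  · have h1 : t + 1 ≤ 0 := by omega
    have e0 : PySem.List.pyRange 0 (t+1) 1 = [] := PySem.List.pyRange_one_eq_nil (by omega)
    have e1 : PySem.List.pyRange 1 (t+1) 1 = [] := PySem.List.pyRange_one_eq_nil (by omega)
    have e2 : PySem.List.pyRange 2 (t+1) 1 = [] := PySem.List.pyRange_one_eq_nil (by omega)
    have ht : (t+1).toNat = 0 := by omega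
    simp [phi_prefix, phi_prefix_alt, e0, e1, e2, ht]

-- ===== VERDICT (by name: the statement is the Claim_ definition above) =====
theorem phi_prefix_spec : Claim_equal_phi_prefix := by
  intro t _
  exact phi_prefix_spec_aux t
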